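-- pv_equiv track=rewrite | github.com/ridgelab/OrthologAnalysis | codonAversion.py | matchCodonCount
-- ===== SOURCE A (Python) =====
-- def checkKey(checkDictionary, key):
-- 	'''
-- 	Takes two arguments: a dictionary and key
-- 	Checks to make sure the key exists in the dictionary
-- 	'''
-- 	if key in checkDictionary:
-- 		return True
-- 	else:
-- 		return False
--
-- def matchCodonCount(seqCodonList, allCounts):
-- 	'''
-- 	Takes two argument: a list of codons and a dictionary of the counts of each codon
-- 	Creates a dictionary of all possible codons
-- 	Counts the number of each codon in the list of codons given
-- 	Adds the count to allCounts dictionary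
-- 	Returns the dictionary with the count of each codon
-- 	'''
-- 	total = 0
-- 	codonsComb = {}
-- 	createList = False
-- 	from itertools import product
-- 	codons = product("ACGT", repeat=3)
-- 	for c in codons:
-- 		c = "".join(c)
-- 		codonsComb[c] = 0
--
-- 	codonError = ""
-- 	for codon in seqCodonList:
-- 		if checkKey(codonsComb, codon):
-- 			total = codonsComb[codon] + 1
-- 			codonsComb[codon] = total
--
-- 		else:
-- 			codonError = codonError + codon
-- 	if allCounts == {}:
-- 		createList = True
-- 	for codon in codonsComb:
-- 		if createList == True:
-- 			allCounts[codon] = []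
-- 		allCounts[codon].append(codonsComb[codon])
-- 	return allCounts
-- ===== SOURCE B (Python) =====
-- def matchCodonCount(seqCodonList, allCounts):
--     from itertools import product
--     createList = (allCounts == {})
--     for c in product("ACGT", repeat=3):
--         codon = "".join(c)
--         if createList:
--             allCounts[codon] = []
--         allCounts[codon].append(seqCodonList.count(codon))
--     return allCounts
-- ===== Notes on version B (the rewrite author's own statement) =====
-- stated objective: simpler
-- what changed: B drops A's 64-entry counting dictionary and its guarded single incrementing pass entirely: it iterates the 64 codons in product order once and computes each count directly with seqCodonList.count(codon), appending it (after the same allCounts=={} create step) straight into allCounts.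
import Mathlib
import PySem

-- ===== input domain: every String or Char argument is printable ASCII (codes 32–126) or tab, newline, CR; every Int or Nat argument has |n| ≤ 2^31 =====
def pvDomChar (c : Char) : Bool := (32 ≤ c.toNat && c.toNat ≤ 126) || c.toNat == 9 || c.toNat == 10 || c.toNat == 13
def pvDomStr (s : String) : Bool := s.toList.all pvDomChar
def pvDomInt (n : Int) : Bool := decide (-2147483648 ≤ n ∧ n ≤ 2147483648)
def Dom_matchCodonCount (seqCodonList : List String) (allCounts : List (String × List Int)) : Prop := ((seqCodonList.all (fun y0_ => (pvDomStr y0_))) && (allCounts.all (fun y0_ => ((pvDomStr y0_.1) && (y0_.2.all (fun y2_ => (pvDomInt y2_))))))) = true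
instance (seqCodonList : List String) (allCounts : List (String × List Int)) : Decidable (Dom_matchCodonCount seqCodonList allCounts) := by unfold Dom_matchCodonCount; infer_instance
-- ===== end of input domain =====

-- B replaces A's counting dictionary and guarded incrementing pass by a direct
-- seqCodonList.count(codon) per codon (objective: simpler; not faster).
-- Both A and B mutate the allCounts dict in place the same way; the equivalence
-- proved here is about the returned dict.

-- itertools.product("ACGT", repeat=3) with "".join: ported by hand as nested
-- flatMaps over the four bases (exact: same 64 strings in the same order).
def pvBases : List Char := ['A', 'C', 'G', 'T']
def pvCodons : List String :=
  pvBases.flatMap (fun a => pvBases.flatMap (fun b => pvBases.map (fun c => String.ofList [a, b, c])))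

-- ===== PORT A =====
def checkKey (checkDictionary : PySem.Dict String Int) (key : String) : Bool :=
  if checkDictionary.contains key then true else false

-- the body of A's counting loop over seqCodonList (state: total, codonsComb, codonError)
def pvCountStep (st : Int × PySem.Dict String Int × String) (codon : String) : Int × PySem.Dict String Int × String :=
  if checkKey st.2.1 codon then
    let total := st.2.1.getD codon 0 + 1
    (total, st.2.1.insert codon total, st.2.2)
  else
    (st.1, st.2.1, st.2.2 ++ codon)

def matchCodonCount (seqCodonList : List String) (allCounts : List (String × List Int)) : List (String × List Int) :=
  -- codonsComb = {codon: 0 for the 64 codons}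
  let codonsComb0 : PySem.Dict String Int :=
    pvCodons.foldl (fun d c => d.insert c 0) PySem.Dict.empty
  -- state (total, codonsComb, codonError)
  let st := seqCodonList.foldl pvCountStep (0, codonsComb0, "")
  let codonsComb := st.2.1
  let createList := allCounts == ([] : List (String × List Int))
  let res := codonsComb.keys.foldl
    (fun (a : PySem.Dict String (List Int)) codon =>
      let a := if createList then a.insert codon ([] : List Int) else a
      match a.get? codon with
      | some l => a.insert codon (l ++ [codonsComb.getD codon 0])
      | none => a)  -- Python raises KeyError here; such inputs are outside Pre_
    (PySem.Dict.mk allCounts)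
  res.items

-- ===== PORT B =====
def matchCodonCount_alt (seqCodonList : List String) (allCounts : List (String × List Int)) : List (String × List Int) :=
  let createList := allCounts == ([] : List (String × List Int))
  let res := pvCodons.foldl
    (fun (a : PySem.Dict String (List Int)) codon =>
      let a := if createList then a.insert codon ([] : List Int) else a
      match a.get? codon with
      | some l => a.insert codon (l ++ [(PySem.List.count seqCodonList codon : Int)])
      | none => a)  -- Python raises KeyError here; such inputs are outside Pre_
    (PySem.Dict.mk allCounts)
  res.items

-- ===== PRECONDITION & SPEC =====
-- Pre_ excludes exactly the inputs on which the Python A raises KeyError: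
-- a nonempty allCounts that is missing one of the 64 codon keys.
def Pre_matchCodonCount (seqCodonList : List String) (allCounts : List (String × List Int)) : Prop :=
  allCounts = [] ∨ ∀ c ∈ pvCodons, c ∈ allCounts.map Prod.fst
instance (seqCodonList : List String) (allCounts : List (String × List Int)) : Decidable (Pre_matchCodonCount seqCodonList allCounts) := by unfold Pre_matchCodonCount; infer_instance

def pvWitness_matchCodonCount : List String × (List (String × List Int)) := (["AAA", "XYZ", "AAA"], [])

def Spec_matchCodonCount (seqCodonList : List String) (allCounts : List (String × List Int)) (out : List (String × List Int)) : Prop := out = matchCodonCount_alt seqCodonList allCounts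
instance (seqCodonList : List String) (allCounts : List (String × List Int)) (out : List (String × List Int)) : Decidable (Spec_matchCodonCount seqCodonList allCounts out) := by unfold Spec_matchCodonCount; infer_instance

-- ===== CLAIM (what is proved, stated in full; the proofs are below) =====
def Claim_equal_matchCodonCount : Prop := ∀ (seqCodonList : List String) (allCounts : List (String × List Int)), Dom_matchCodonCount seqCodonList allCounts → Pre_matchCodonCount seqCodonList allCounts → Spec_matchCodonCount seqCodonList allCounts (matchCodonCount seqCodonList allCounts)

-- ===== LEMMAS AND PROOFS =====

-- The counting pass never changes the key list of codonsComb.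
theorem countPass_keys (xs : List String) (st : Int × PySem.Dict String Int × String) :
    (xs.foldl pvCountStep st).2.1.keys = st.2.1.keys := by
  induction xs generalizing st with
  | nil => rfl
  | cons x xs ih =>
    simp only [List.foldl_cons]
    rw [ih]
    by_cases h : st.2.1.contains x = true
    · simp [pvCountStep, checkKey, h, PySem.Dict.keys_insert_of_contains _ _ h]
    · simp [pvCountStep, checkKey, h]

-- The counting pass adds to each key already present the number of its
-- occurrences in the remaining codon list.
theorem countPass_getD (xs : List String) (st : Int × PySem.Dict String Int × String)
    (c : String) (hc : c ∈ st.2.1.keys) :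
    (xs.foldl pvCountStep st).2.1.getD c 0
    = st.2.1.getD c 0 + (PySem.List.count xs c : Int) := by
  induction xs generalizing st with
  | nil => simp [PySem.List.count]
  | cons x xs ih =>
    simp only [List.foldl_cons]
    by_cases h : st.2.1.contains x = true
    · rw [ih _ (by
        simp only [pvCountStep, checkKey, h, if_true]
        simp only [PySem.Dict.keys_insert_of_contains _ _ h]
        exact hc)]
      simp only [pvCountStep, checkKey, h, if_true]
      rw [PySem.Dict.getD_insert]
      by_cases hcx : c = x
      · subst hcx
        simp [PySem.List.count]
        ring
      · simp [hcx, PySem.List.count, Ne.symm hcx]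
    · rw [ih _ (by simp only [pvCountStep, checkKey, h, Bool.false_eq_true, if_false]; exact hc)]
      have hxc : x ≠ c := by
        intro hxc; subst hxc
        exact h ((PySem.Dict.contains_iff_mem_keys _ _).2 hc)
      simp [pvCountStep, checkKey, h, PySem.List.count, hxc]

-- Facts about the literal initial dictionary (a closed term).
set_option maxRecDepth 20000 in
theorem d64_keys :
    (pvCodons.foldl (fun d c => d.insert c 0) (PySem.Dict.empty : PySem.Dict String Int)).keys
      = pvCodons := by decide

set_option maxRecDepth 20000 in
theorem d64_getD :
    pvCodons.all (fun c =>
      (pvCodons.foldl (fun d c => d.insert c 0) (PySem.Dict.empty : PySem.Dict String Int)).getD c 0 == 0)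
      = true := by decide

-- ===== VERDICT (by name: the statement is the Claim_ definition above) =====
theorem matchCodonCount_spec : Claim_equal_matchCodonCount := by
  intro xs ac _hdom _hpre
  unfold Spec_matchCodonCount matchCodonCount matchCodonCount_alt
  simp only
  rw [countPass_keys, d64_keys]
  refine congrArg PySem.Dict.items ?_
  apply PySem.List.foldl_congr_mem
  intro a c hcmem
  have h1 : (xs.foldl pvCountStep
      (0, pvCodons.foldl (fun d c => d.insert c 0) PySem.Dict.empty, "")).2.1.getD c 0
      = (PySem.List.count xs c : Int) := by
    rw [countPass_getD _ _ c (by rw [d64_keys]; exact hcmem)]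
    have h0 := List.all_eq_true.mp d64_getD c hcmem
    have h0' : (pvCodons.foldl (fun d c => d.insert c 0)
        (PySem.Dict.empty : PySem.Dict String Int)).getD c 0 = 0 := by
      exact_mod_cast eq_of_beq h0
    rw [h0', zero_add]
  rw [h1]
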